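-- pv_equiv track=rewrite | github.com/ElliotGestrin/AdventOfCode | 2020/Dag20.py | generateTile
-- ===== SOURCE A (Python) =====
-- def generateTile(lines):
--     tile = {}
--     tile["A0"] = lines[0]
--     tile["B1"] = ""
--     tile["B0"] = ""
--     for index in range(0, len(lines)):
--         if not lines[index]:
--             index -= 1
--             break
--         tile["B1"] += lines[index][0]
--         tile["B0"] += lines[index][-1]
--     tile["A1"] = lines[index]
--     return tile
-- ===== SOURCE B (Python) =====
-- def generateTile(lines):
--     # boundary: position of the first empty line (the only falsy string), else all lines
--     try:
--         p = lines.index("")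
--     except ValueError:
--         p = len(lines)
--     b1 = b0 = ""
--     i = p
--     while i > 0:
--         i -= 1
--         b1 = lines[i][0] + b1
--         b0 = lines[i][-1] + b0
--     return {"A0": lines[0], "B1": b1, "B0": b0, "A1": lines[p - 1]}
-- ===== Notes on version B (the rewrite author's own statement) =====
-- stated objective: alternative
-- what changed: Replaces A's forward index loop that grows the two edge strings by '+=' with a library search (list.index of the empty line, falling back to len) followed by a backwards while loop that builds both edge strings back-to-front by prepending characters.
-- outside the precondition, e.g. on generateTile([]): A raises IndexError, B raises IndexError
import Mathlib
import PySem

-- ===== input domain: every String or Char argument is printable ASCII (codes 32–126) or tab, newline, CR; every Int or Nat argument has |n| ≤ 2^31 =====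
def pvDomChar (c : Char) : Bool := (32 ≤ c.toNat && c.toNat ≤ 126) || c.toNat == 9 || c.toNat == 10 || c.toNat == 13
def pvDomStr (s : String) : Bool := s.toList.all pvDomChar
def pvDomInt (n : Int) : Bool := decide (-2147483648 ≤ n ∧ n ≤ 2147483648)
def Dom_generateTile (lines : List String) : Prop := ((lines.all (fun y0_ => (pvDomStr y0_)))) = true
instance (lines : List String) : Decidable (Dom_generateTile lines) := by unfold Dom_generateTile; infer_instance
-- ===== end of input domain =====

-- B finds the boundary with list.index("") and then builds both edge strings back-to-front with a backwards while loop (alternative decomposition, same cost).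


-- ===== PORT A =====
-- A's for-loop over range(0, len(lines)) with break: structural recursion over the
-- remaining suffix, tracking the current index and the two accumulated edge strings
-- (as List Char; String '+=' of one char appends it). On break the result index is
-- i - 1; on normal completion the last index is also i - 1 (i = len there).
def genLoopA : List String → Nat → List Char → List Char → List Char × List Char × Int
  | [], i, b1, b0 => (b1, b0, (i : Int) - 1)
  | s :: rs, i, b1, b0 =>
    if s = "" then (b1, b0, (i : Int) - 1)
    else genLoopA rs (i + 1) (b1 ++ [(PySem.Str.pyGet? s 0).getD ' '])
                             (b0 ++ [(PySem.Str.pyGet? s (-1)).getD ' '])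

def generateTile (lines : List String) : List (String × String) :=
  let a0 := (PySem.List.pyGet? lines 0).getD ""      -- lines[0]; Pre_ excludes the IndexError
  let r := genLoopA lines 0 [] []
  [("A0", a0), ("B1", String.ofList r.1), ("B0", String.ofList r.2.1),
   ("A1", (PySem.List.pyGet? lines r.2.2).getD "")]  -- lines[index], possibly -1 (Python wrap)

-- ===== PORT B =====
-- p = lines.index("") with ValueError fallback len(lines)
def boundaryB (lines : List String) : Nat :=
  (PySem.List.index? lines "").getD lines.length

-- the 'while i > 0: i -= 1; b1 = lines[i][0] + b1; b0 = lines[i][-1] + b0' loop: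
-- recursion on the counter i, prepending each character to the accumulators
def backLoopB (lines : List String) : Nat → List Char → List Char → List Char × List Char
  | 0, b1, b0 => (b1, b0)
  | Nat.succ i, b1, b0 =>
      backLoopB lines i
        ((PySem.Str.pyGet? ((PySem.List.pyGet? lines (i : Int)).getD "") 0).getD ' ' :: b1)
        ((PySem.Str.pyGet? ((PySem.List.pyGet? lines (i : Int)).getD "") (-1)).getD ' ' :: b0)

def generateTile_alt (lines : List String) : List (String × String) :=
  let p := boundaryB lines
  let r := backLoopB lines p [] []
  [("A0", (PySem.List.pyGet? lines 0).getD ""),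
   ("B1", String.ofList r.1), ("B0", String.ofList r.2),
   ("A1", (PySem.List.pyGet? lines ((p : Int) - 1)).getD "")]   -- lines[p-1] (p=0 wraps to the last line, as in A)

-- ===== PRECONDITION & SPEC =====
-- On [] both Pythons raise IndexError (lines[0]); excluded.
def Pre_generateTile (lines : List String) : Prop := lines ≠ []
instance (lines : List String) : Decidable (Pre_generateTile lines) := by unfold Pre_generateTile; infer_instance
def pvWitness_generateTile : List String := ["#.#", "..#", "#.."]

def Spec_generateTile (lines : List String) (out : List (String × String)) : Prop := out = generateTile_alt lines
instance (lines : List String) (out : List (String × String)) : Decidable (Spec_generateTile lines out) := by unfold Spec_generateTile; infer_instance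

-- ===== CLAIM =====
def Claim_equal_generateTile : Prop := ∀ (lines : List String), Dom_generateTile lines → Pre_generateTile lines → Spec_generateTile lines (generateTile lines)

-- ===== LEMMAS AND PROOFS =====
-- index of the first empty line (proof-side characterisation of both loops' stopping point)
def firstEmpty : List String → Nat
  | [] => 0
  | s :: rs => if s = "" then 0 else firstEmpty rs + 1

theorem firstEmpty_le (xs : List String) : firstEmpty xs ≤ xs.length := by
  induction xs with
  | nil => simp [firstEmpty]
  | cons s rs ih =>
    by_cases hs : s = ""
    · simp [firstEmpty, hs]
    · simp [firstEmpty, hs]; omega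

theorem boundaryB_eq (xs : List String) : boundaryB xs = firstEmpty xs := by
  unfold boundaryB
  induction xs with
  | nil => simp [firstEmpty]
  | cons s rs ih =>
    by_cases hs : s = ""
    · subst hs; rw [PySem.List.index?_cons_self]; simp [firstEmpty]
    · rw [PySem.List.index?_cons_of_ne rs hs]
      cases h : PySem.List.index? rs "" with
      | none => rw [h] at ih; simp at ih; simp [firstEmpty, hs]; omega
      | some k => rw [h] at ih; simp at ih; simp [firstEmpty, hs]; omega

theorem genLoopA_eq (xs : List String) : ∀ (i : Nat) (b1 b0 : List Char),
    genLoopA xs i b1 b0 =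
      (b1 ++ (xs.take (firstEmpty xs)).map (fun l => (PySem.Str.pyGet? l 0).getD ' '),
       b0 ++ (xs.take (firstEmpty xs)).map (fun l => (PySem.Str.pyGet? l (-1)).getD ' '),
       (i : Int) + (firstEmpty xs : Int) - 1) := by
  induction xs with
  | nil => intro i b1 b0; simp [genLoopA, firstEmpty]
  | cons s rs ih =>
    intro i b1 b0
    by_cases hs : s = ""
    · simp [genLoopA, firstEmpty, hs]
    · simp only [genLoopA, firstEmpty, hs, if_false, ih]
      simp only [Prod.ext_iff]
      refine ⟨by simp, by simp, by push_cast; ring⟩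

theorem backLoopB_eq (xs : List String) : ∀ (i : Nat), i ≤ xs.length → ∀ (b1 b0 : List Char),
    backLoopB xs i b1 b0 =
      ((xs.take i).map (fun l => (PySem.Str.pyGet? l 0).getD ' ') ++ b1,
       (xs.take i).map (fun l => (PySem.Str.pyGet? l (-1)).getD ' ') ++ b0) := by
  intro i
  induction i with
  | zero => intro _ b1 b0; simp [backLoopB]
  | succ i ih =>
    intro hle b1 b0
    have hi : i < xs.length := by omega
    have hget : (PySem.List.pyGet? xs (i : Int)).getD "" = xs[i] := by
      simp [PySem.List.pyGet?_natCast, List.getElem?_eq_getElem hi]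
    rw [backLoopB, hget, ih (by omega)]
    have htake : xs.take (i + 1) = xs.take i ++ [xs[i]] := by
      rw [List.take_add_one, List.getElem?_eq_getElem hi]; rfl
    rw [htake]
    simp only [List.map_append, List.map_cons, List.map_nil, List.append_assoc,
      List.cons_append, List.nil_append]

-- ===== VERDICT =====
theorem generateTile_spec : Claim_equal_generateTile := by
  intro lines _ _
  unfold Spec_generateTile
  simp only [generateTile, generateTile_alt, boundaryB_eq, genLoopA_eq,
    backLoopB_eq lines (firstEmpty lines) (firstEmpty_le lines)]
  simp
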